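-- pv_equiv track=rewrite | github.com/dawidtt/Tabu_Search | Tabu.py | initialize_neighbor_color_count
-- ===== SOURCE A (Python) =====
-- def initialize_neighbor_color_count(graph, coloring):
--     neighbor_color_count = [{} for _ in range(len(graph))]
--     for u in graph:
--         for v in graph[u]:
--             color_u = coloring[u]
--             color_v = coloring[v]
--             if color_u != -1:
--                 neighbor_color_count[v][color_u] = neighbor_color_count[v].get(color_u, 0) + 1
--             if color_v != -1:
--                 neighbor_color_count[u][color_v] = neighbor_color_count[u].get(color_v, 0) + 1
--     return neighbor_color_count
-- ===== SOURCE B (Python) =====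
-- def initialize_neighbor_color_count(graph, coloring):
--     # Flatten the edge scan into one ordered event list (target, color),
--     # then build each vertex's dict by dedup-then-count over its color stream.
--     events = [(t, c)
--               for u in graph
--               for v in graph[u]
--               for t, c in ((v, coloring[u]), (u, coloring[v]))
--               if c != -1]
--     result = []
--     for w in range(len(graph)):
--         colors = [c for t, c in events if t == w]
--         result.append({c: colors.count(c) for c in dict.fromkeys(colors)})
--     return result
-- ===== Notes on version B (the rewrite author's own statement) =====
-- stated objective: alternative
-- what changed: B replaces the in-place indexed dict increments with a flattened ordered (target,color) event list followed by a per-vertex filter + dedup-and-count pass that builds each dict at once.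
-- outside the precondition, e.g. on initialize_neighbor_color_count({-1: [0], 0: []}, [1, 2]): A returns [{2: 1}, {1: 1}], B returns [{2: 1}, {}]
import Mathlib
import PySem

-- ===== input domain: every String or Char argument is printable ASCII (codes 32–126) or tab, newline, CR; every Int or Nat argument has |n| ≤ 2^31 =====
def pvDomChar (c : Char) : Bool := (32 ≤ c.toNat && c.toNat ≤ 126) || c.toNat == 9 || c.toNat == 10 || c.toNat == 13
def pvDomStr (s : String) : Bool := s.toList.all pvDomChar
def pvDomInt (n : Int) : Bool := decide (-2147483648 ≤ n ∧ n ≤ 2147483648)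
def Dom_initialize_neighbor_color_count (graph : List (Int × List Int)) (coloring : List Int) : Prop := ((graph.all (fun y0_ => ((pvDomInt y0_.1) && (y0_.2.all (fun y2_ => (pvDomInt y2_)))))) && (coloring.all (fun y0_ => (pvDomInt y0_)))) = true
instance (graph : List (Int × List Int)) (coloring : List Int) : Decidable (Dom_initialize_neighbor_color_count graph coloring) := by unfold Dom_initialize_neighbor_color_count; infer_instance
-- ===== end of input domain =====

-- B builds one flattened ordered (target, color) event list and then each vertex's dict by a
-- dedup-and-count pass, instead of A's in-place indexed dict increments (objective: alternative).


-- ===== PORT A =====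
-- 'neighbor_color_count[i][c] = neighbor_color_count[i].get(c, 0) + 1' at list index i
def nccIncr (ncc : List (PySem.Dict Int Int)) (i c : Int) : List (PySem.Dict Int Int) :=
  let d := PySem.List.pyGetD ncc i PySem.Dict.empty
  PySem.List.pySetD ncc i (d.insert c (d.getD c 0 + 1))

def initialize_neighbor_color_count (graph : List (Int × List Int)) (coloring : List Int) : List (List (Int × Int)) :=
  (graph.foldl
    (fun ncc e =>
      ((PySem.Dict.mk graph).getD e.1 []).foldl
        (fun ncc2 v =>
          let color_u := PySem.List.pyGetD coloring e.1 0
          let color_v := PySem.List.pyGetD coloring v 0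
          let ncc3 := if color_u ≠ -1 then nccIncr ncc2 v color_u else ncc2
          if color_v ≠ -1 then nccIncr ncc3 e.1 color_v else ncc3)
        ncc)
    (List.replicate graph.length PySem.Dict.empty)).map PySem.Dict.items

-- ===== PORT B =====
-- the two candidate events of one edge (u, v), kept when the color is not -1
def pairEvents (coloring : List Int) (u v : Int) : List (Int × Int) :=
  ([(v, PySem.List.pyGetD coloring u 0), (u, PySem.List.pyGetD coloring v 0)]).filter
    (fun tc => tc.2 ≠ -1)

def initialize_neighbor_color_count_alt (graph : List (Int × List Int)) (coloring : List Int) : List (List (Int × Int)) :=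
  let events := graph.flatMap (fun e =>
    ((PySem.Dict.mk graph).getD e.1 []).flatMap (fun v => pairEvents coloring e.1 v))
  (List.range graph.length).map (fun (w : Nat) =>
    let colors := (events.filter (fun tc => tc.1 == ((w : Nat) : Int))).map (·.2)
    (PySem.List.dedup colors).map (fun c => (c, (colors.count c : Int))))

-- ===== PRECONDITION & SPEC =====
-- Pre_ restricts vertex ids (dict keys and adjacency entries) to the natural domain 0 ≤ x < len(graph)
-- and x < len(coloring): outside it A either raises IndexError or reads lists through Python's
-- accidental negative-index wraparound (a defensible corner nobody would specify; see claim cites).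
def Pre_initialize_neighbor_color_count (graph : List (Int × List Int)) (coloring : List Int) : Prop :=
  ∀ e ∈ graph,
    (0 ≤ e.1 ∧ e.1 < graph.length ∧ e.1 < coloring.length) ∧
    ∀ v ∈ e.2, 0 ≤ v ∧ v < graph.length ∧ v < coloring.length

instance (graph : List (Int × List Int)) (coloring : List Int) : Decidable (Pre_initialize_neighbor_color_count graph coloring) := by unfold Pre_initialize_neighbor_color_count; infer_instance

def pvWitness_initialize_neighbor_color_count : (List (Int × List Int)) × List Int :=
  ([(0, [1, 1]), (1, [0])], [2, -1])

def Spec_initialize_neighbor_color_count (graph : List (Int × List Int)) (coloring : List Int) (out : List (List (Int × Int))) : Prop := out = initialize_neighbor_color_count_alt graph coloring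
instance (graph : List (Int × List Int)) (coloring : List Int) (out : List (List (Int × Int))) : Decidable (Spec_initialize_neighbor_color_count graph coloring out) := by unfold Spec_initialize_neighbor_color_count; infer_instance

-- ===== CLAIM (what is proved, stated in full; the proofs are below) =====
def Claim_equal_initialize_neighbor_color_count : Prop := ∀ (graph : List (Int × List Int)) (coloring : List Int), Dom_initialize_neighbor_color_count graph coloring → Pre_initialize_neighbor_color_count graph coloring → Spec_initialize_neighbor_color_count graph coloring (initialize_neighbor_color_count graph coloring)

-- ===== LEMMAS AND PROOFS =====

-- one event applied to A's state
def evStep (s : List (PySem.Dict Int Int)) (tc : Int × Int) : List (PySem.Dict Int Int) :=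
  nccIncr s tc.1 tc.2

-- the color stream a vertex receives from an event list
def colorsOf (evs : List (Int × Int)) (w : Int) : List Int :=
  (evs.filter (fun tc => tc.1 == w)).map (·.2)

theorem counter_snoc (xs : List Int) (c : Int) :
    PySem.Dict.counter (xs ++ [c]) =
      (PySem.Dict.counter xs).insert c ((PySem.Dict.counter xs).getD c 0 + 1) := by
  rw [← PySem.Dict.foldl_insert_getD_add_one_eq_counter, List.foldl_append]
  simp [PySem.Dict.foldl_insert_getD_add_one_eq_counter]

theorem set_map_range {α : Type} (n k : Nat) (f : Nat → α) (v : α) (_hk : k < n) :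
    ((List.range n).map f).set k v = (List.range n).map (fun w => if w = k then v else f w) := by
  apply List.ext_getElem <;> simp
  intro i hi
  rcases eq_or_ne i k with h | h
  · simp [h]
  · simp [h, Ne.symm h]

theorem colorsOf_snoc (evs : List (Int × Int)) (tc : Int × Int) (w : Int) :
    colorsOf (evs ++ [tc]) w =
      colorsOf evs w ++ (if tc.1 == w then [tc.2] else []) := by
  unfold colorsOf
  rw [List.filter_append, List.map_append]
  split_ifs with h <;> simp [List.filter, h]

theorem foldl_evStep_eq_map_counter (n : Nat) (evs : List (Int × Int))
    (h : ∀ tc ∈ evs, 0 ≤ tc.1 ∧ tc.1 < (n : Int)) :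
    evs.foldl evStep (List.replicate n PySem.Dict.empty) =
      (List.range n).map (fun (w : Nat) => PySem.Dict.counter (colorsOf evs (w : Int))) := by
  induction evs using List.reverseRecOn with
  | nil =>
    have h1 : (List.range n).map (fun (w : Nat) => PySem.Dict.counter (colorsOf [] (w : Int))) =
        (List.range n).map (fun _ => (PySem.Dict.empty : PySem.Dict Int Int)) :=
      List.map_congr_left (fun a _ => by simp [colorsOf]; rfl)
    rw [List.foldl_nil, h1, List.map_const', List.length_range]
  | append_singleton evs tc ih =>
    have hrest : ∀ p ∈ evs, 0 ≤ p.1 ∧ p.1 < (n : Int) := fun p hp => h p (by simp [hp])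
    have htc : 0 ≤ tc.1 ∧ tc.1 < (n : Int) := h tc (by simp)
    have hklt : tc.1.toNat < n := by omega
    rw [List.foldl_append, ih hrest, List.foldl_cons, List.foldl_nil]
    simp only [evStep, nccIncr]
    rw [PySem.List.pyGetD_eq_getElem _ _ htc.1 (by simpa using htc.2),
        PySem.List.pySetD_of_nonneg _ _ htc.1]
    simp only [List.getElem_map, List.getElem_range]
    rw [set_map_range n tc.1.toNat _ _ hklt]
    apply List.map_congr_left
    intro w hw
    rw [colorsOf_snoc]
    rcases eq_or_ne w tc.1.toNat with hwk | hwk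
    · have hbeq : (tc.1 == (w : Int)) = true := by simp [hwk]; omega
      rw [if_pos hwk, hbeq, if_pos rfl, counter_snoc]
      have : ((tc.1.toNat : Nat) : Int) = tc.1 := by omega
      rw [hwk, this]
    · have hbeq : (tc.1 == (w : Int)) = false := by
        simp only [beq_eq_false_iff_ne, ne_eq]; omega
      rw [if_neg hwk, hbeq]
      simp

theorem mem_getD_mk (graph : List (Int × List Int)) (u : Int) (v : Int)
    (hv : v ∈ (PySem.Dict.mk graph).getD u []) : ∃ e ∈ graph, v ∈ e.2 := by
  induction graph with
  | nil =>
    rw [PySem.Dict.getD_eq_get?_getD] at hv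
    simp [show PySem.Dict.mk ([] : List (Int × List Int)) = PySem.Dict.empty from rfl,
      PySem.Dict.get?_empty] at hv
  | cons e rest ih =>
    rw [PySem.Dict.getD_eq_get?_getD, PySem.Dict.get?_mk_cons] at hv
    by_cases he : e.1 == u
    · simp [he] at hv
      exact ⟨e, by simp, hv⟩
    · simp only [he, Bool.false_eq_true, if_false] at hv
      rw [← PySem.Dict.getD_eq_get?_getD] at hv
      obtain ⟨e', he', hv'⟩ := ih hv
      exact ⟨e', by simp [he'], hv'⟩

theorem inner_eq (coloring : List Int) (u v : Int) (s : List (PySem.Dict Int Int)) :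
    (let color_u := PySem.List.pyGetD coloring u 0
     let color_v := PySem.List.pyGetD coloring v 0
     let s3 := if color_u ≠ -1 then nccIncr s v color_u else s
     if color_v ≠ -1 then nccIncr s3 u color_v else s3) =
      (pairEvents coloring u v).foldl evStep s := by
  simp only [pairEvents]
  split_ifs with h1 h2 h2 <;> simp [List.filter, h1, h2, evStep]

theorem initialize_neighbor_color_count_spec : Claim_equal_initialize_neighbor_color_count := by
  intro graph coloring _ hpre
  unfold Spec_initialize_neighbor_color_count
  unfold initialize_neighbor_color_count initialize_neighbor_color_count_alt
  simp only []
  -- turn A's nested loop into one fold over B's event list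
  have hA : graph.foldl
      (fun ncc e =>
        ((PySem.Dict.mk graph).getD e.1 []).foldl
          (fun ncc2 v =>
            let color_u := PySem.List.pyGetD coloring e.1 0
            let color_v := PySem.List.pyGetD coloring v 0
            let ncc3 := if color_u ≠ -1 then nccIncr ncc2 v color_u else ncc2
            if color_v ≠ -1 then nccIncr ncc3 e.1 color_v else ncc3)
          ncc)
      (List.replicate graph.length PySem.Dict.empty) =
      (graph.flatMap (fun e =>
        ((PySem.Dict.mk graph).getD e.1 []).flatMap (fun v => pairEvents coloring e.1 v))).foldl
        evStep (List.replicate graph.length PySem.Dict.empty) := by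
    rw [List.foldl_flatMap]
    apply PySem.List.foldl_congr_mem
    intro acc e _
    rw [List.foldl_flatMap]
    exact PySem.List.foldl_congr_mem _ _ _ _ (fun s v _ => inner_eq coloring e.1 v s)
  rw [hA]
  set evs := graph.flatMap (fun e =>
    ((PySem.Dict.mk graph).getD e.1 []).flatMap (fun v => pairEvents coloring e.1 v)) with hevs
  have hrange : ∀ tc ∈ evs, 0 ≤ tc.1 ∧ tc.1 < (graph.length : Int) := by
    intro tc htc
    rw [hevs, List.mem_flatMap] at htc
    obtain ⟨e, he, htc⟩ := htc
    rw [List.mem_flatMap] at htc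
    obtain ⟨v, hv, htc⟩ := htc
    have hvrange : 0 ≤ v ∧ v < (graph.length : Int) := by
      obtain ⟨e', he', hv'⟩ := mem_getD_mk graph e.1 v hv
      exact ⟨((hpre e' he').2 v hv').1, ((hpre e' he').2 v hv').2.1⟩
    have hurange : 0 ≤ e.1 ∧ e.1 < (graph.length : Int) :=
      ⟨(hpre e he).1.1, (hpre e he).1.2.1⟩
    unfold pairEvents at htc
    have hmem := (List.mem_filter.mp htc).1
    simp only [List.mem_cons, List.not_mem_nil, or_false] at hmem
    rcases hmem with h | h
    · rw [h]; exact hvrange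
    · rw [h]; exact hurange
  rw [foldl_evStep_eq_map_counter graph.length evs hrange, List.map_map]
  apply List.map_congr_left
  intro w _
  simp only [Function.comp_apply, PySem.Dict.items_counter, PySem.List.dedup_eq_ofList]
  rfl
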